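-- pv_equiv track=rewrite | github.com/Siddharthh39/data-structures | randoms/CustomSortString.py | specificOrder
-- ===== SOURCE A (Python) =====
-- from collections import Counter
--
-- def specificOrder(x: str, y: str):
--     freq = Counter(x)
--     result = []
--
--     for ch in y:
--         if ch in freq:
--             result.append(ch * freq[ch])
--             del freq[ch]
--
--     for ch, count in freq.items():
--         result.append(ch * count)
--
--     return "".join(result)
-- ===== SOURCE B (Python) =====
-- def specificOrder(x: str, y: str):
--     def key(c):
--         return (y.index(c) if c in y else len(y), x.index(c))
--     return "".join(sorted(x, key=key))
-- ===== Notes on version B (the rewrite author's own statement) =====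
-- stated objective: idiomatic
-- what changed: Replaces A's Counter bucket-emission (emit y-chars with counts, then leftover counts) by a stable comparison sort of x's characters under the compound key (first index in y or len(y), first index in x), which groups equal characters and orders groups by y-rank then first appearance.
import Mathlib
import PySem

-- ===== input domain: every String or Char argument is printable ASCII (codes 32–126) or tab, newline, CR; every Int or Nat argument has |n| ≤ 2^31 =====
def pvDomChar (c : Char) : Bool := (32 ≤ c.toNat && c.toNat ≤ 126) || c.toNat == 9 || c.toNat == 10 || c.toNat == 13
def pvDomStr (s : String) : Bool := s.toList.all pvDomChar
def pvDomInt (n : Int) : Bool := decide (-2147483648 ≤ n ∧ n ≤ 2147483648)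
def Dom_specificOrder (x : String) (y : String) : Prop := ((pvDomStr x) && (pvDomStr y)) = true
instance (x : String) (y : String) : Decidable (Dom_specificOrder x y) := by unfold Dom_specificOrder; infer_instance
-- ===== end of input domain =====

-- B replaces A's Counter bucket-emission by a stable sort of x's characters under the
-- compound key (first index in y, or len(y) if absent; first index in x) — idiomatic, no speed claim.

-- ===== PORT A =====
-- literal port: freq = Counter(x); for ch in y: if present, append ch*freq[ch] and delete;
-- then append ch*count for the remaining items; "".join over a list of strings = flatten (exact).
def specificOrder (x : String) (y : String) : String :=
  let freq := PySem.Dict.counter x.toList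
  let st := y.toList.foldl
    (fun (acc : List (List Char) × PySem.Dict Char Int) ch =>
      if acc.2.contains ch then
        (acc.1 ++ [PySem.List.pyRepeat [ch] (acc.2.getD ch 0)], acc.2.erase ch)
      else acc) ([], freq)
  let res := st.2.items.foldl (fun r p => r ++ [PySem.List.pyRepeat [p.1] p.2]) st.1
  String.ofList res.flatten

-- ===== PORT B =====
-- literal port of Source B: "".join(sorted(x, key=lambda c: (y.index(c) if c in y else len(y), x.index(c))));
-- the tuple key is sorted2's two components; str.index of a single char = first list index, ported as
-- PySem.List.index? on toList with getD 0 (the default is unreachable: x.index(c) is only evaluated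
-- for c drawn from x, and y.index(c) only under the 'c in y' guard, so Python never raises here).
def specificOrder_alt (x : String) (y : String) : String :=
  String.ofList (PySem.List.sorted2 x.toList
    (fun c => if y.toList.contains c then (((PySem.List.index? y.toList c).getD 0 : Nat) : Int)
              else (y.toList.length : Int))
    (fun c => (((PySem.List.index? x.toList c).getD 0 : Nat) : Int))
    false)

-- ===== PRECONDITION & SPEC =====
def Spec_specificOrder (x : String) (y : String) (out : String) : Prop := out = specificOrder_alt x y
instance (x : String) (y : String) (out : String) : Decidable (Spec_specificOrder x y out) := by unfold Spec_specificOrder; infer_instance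

-- ===== CLAIM (what is proved, stated in full; the proofs are below) =====
def Claim_equal_specificOrder : Prop := ∀ (x : String) (y : String), Dom_specificOrder x y → Spec_specificOrder x y (specificOrder x y)

-- ===== LEMMAS AND PROOFS =====

-- proof-side names for B's two key components and the combined scalar key
def key1 (y : List Char) (c : Char) : Int :=
  if y.contains c then (((PySem.List.index? y c).getD 0 : Nat) : Int) else (y.length : Int)
def key2 (x : List Char) (c : Char) : Int := (((PySem.List.index? x c).getD 0 : Nat) : Int)
def keyK (x y : List Char) (c : Char) : Int := key1 y c * ((x.length : Int) + 1) + key2 x c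

-- the common middle form: distinct chars in A's emission order, each repeated its x-count
def blkL (x : List Char) (c : Char) : List Char := List.replicate (List.count c x) c
def DL (x y : List Char) : List Char :=
  PySem.List.dedup y ++ (PySem.List.dedup x).filter (fun c => !y.contains c)

-- ---- A-side machinery ----

-- the dict A holds after erasing every key in S: Counter(x) restricted to first occurrences not in S
def ctrS (x S : List Char) : PySem.Dict Char Int :=
  ⟨((PySem.List.dedup x).filter (fun c => !S.contains c)).map (fun c => (c, (List.count c x : Int)))⟩

-- the elements xs adds to an accumulating set S (first occurrences of xs not in S, in order)
def gNew : List Char → List Char → List Char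
  | _, [] => []
  | S, c :: xs => if S.contains c then gNew S xs else c :: gNew (S ++ [c]) xs

-- the list of strings A's first loop appends, with S the keys already erased
def emitA (x : List Char) : List Char → List Char → List (List Char)
  | [], _ => []
  | c :: ys, S =>
    if x.contains c && !S.contains c then
      List.replicate (List.count c x) c :: emitA x ys (S ++ [c])
    else emitA x ys (S ++ [c])

lemma gNew_congr (xs : List Char) : ∀ S S', (∀ a, a ∈ S ↔ a ∈ S') →
    gNew S xs = gNew S' xs := by
  induction xs with
  | nil => intro S S' h; rfl
  | cons c xs ih =>
    intro S S' h
    have h2 : ∀ a, a ∈ S ++ [c] ↔ a ∈ S' ++ [c] := by intro a; simp [h a]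
    by_cases hc : c ∈ S
    · simp [gNew, hc, (h c).mp hc, ih S S' h]
    · have hc' : c ∉ S' := fun hx => hc ((h c).mpr hx)
      simp [gNew, hc, hc', ih _ _ h2]

lemma foldl_add_eq (xs : List Char) : ∀ S, xs.foldl PySem.Set.add S = S ++ gNew S xs := by
  induction xs with
  | nil => intro S; simp [gNew]
  | cons c xs ih =>
    intro S
    simp only [List.foldl_cons, PySem.Set.add, PySem.Set.contains, gNew]
    by_cases hc : c ∈ S
    · simp [hc, ih S]
    · simp [hc, ih (S ++ [c])]

lemma gNew_filter (S : List Char) (xs : List Char) : ∀ T,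
    gNew (S ++ T) xs = (gNew T xs).filter (fun c => !S.contains c) := by
  induction xs with
  | nil => intro T; rfl
  | cons c xs ih =>
    intro T
    by_cases ht : c ∈ T
    · have h1 : c ∈ S ++ T := by simp [ht]
      simp [gNew, h1, ht, ih T]
    · by_cases hs : c ∈ S
      · have h1 : c ∈ S ++ T := by simp [hs]
        have hs' : S.contains c = true := by simpa using hs
        simp only [gNew, List.contains_iff_mem, h1, decide_true, if_true, ht, List.filter_cons,
          hs', Bool.not_true, Bool.false_eq_true, if_false]
        rw [← ih (T ++ [c]), ← List.append_assoc]
        apply gNew_congr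
        intro a
        by_cases hac : a = c <;> simp [hac, hs]
      · have h1 : c ∉ S ++ T := by simp [hs, ht]
        have hs' : S.contains c = false := by simpa using hs
        simp only [gNew, List.contains_iff_mem, h1, decide_false, Bool.false_eq_true, if_false,
          ht, List.filter_cons, hs', Bool.not_false, if_true]
        rw [← ih (T ++ [c]), List.append_assoc]

lemma ctrS_counter (x : List Char) : PySem.Dict.counter x = ctrS x [] := by
  apply PySem.Dict.ext
  simp [PySem.Dict.items_counter, ctrS, PySem.List.dedup]

lemma ctrS_contains (x S : List Char) (c : Char) :
    (ctrS x S).contains c = (x.contains c && !S.contains c) := by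
  simp only [PySem.Dict.contains, ctrS, List.any_map, List.any_filter]
  by_cases hx : c ∈ x <;> by_cases hs : c ∈ S <;>
      simp [List.any_eq_true, Function.comp, PySem.List.mem_dedup, hx, hs]
  · exact fun a _ haS heq => haS (heq ▸ hs)
  · exact fun a hax _ heq => hx (heq ▸ hax)
  · exact fun a hax _ heq => hx (heq ▸ hax)

lemma ctrS_getD (x S : List Char) (c : Char) (hx : c ∈ x) (hs : c ∉ S) :
    (ctrS x S).getD c 0 = (List.count c x : Int) := by
  apply PySem.Dict.getD_of_mem_items (d := ctrS x S)
  · simp only [ctrS, List.mem_map, List.mem_filter, PySem.List.mem_dedup]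
    exact ⟨c, ⟨by simpa [PySem.List.mem_dedup] using hx, by simpa using hs⟩, rfl⟩
  · simp only [PySem.Dict.keys, ctrS, List.map_map]
    have : ((fun x_1 => x_1.1) ∘ fun c => (c, (List.count c x : Int))) = id := rfl
    rw [this, List.map_id]
    exact ((PySem.List.nodup_dedup x).filter _)

lemma ctrS_erase (x S : List Char) (c : Char) :
    (ctrS x S).erase c = ctrS x (S ++ [c]) := by
  apply PySem.Dict.ext
  simp only [PySem.Dict.erase, ctrS, List.filter_map, List.filter_filter]
  congr 1
  apply List.filter_congr
  intro a _
  by_cases hac : a = c <;> simp [Function.comp, hac]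

lemma ctrS_congr (x : List Char) (S S' : List Char)
    (h : ∀ a, a ∈ x → (a ∈ S ↔ a ∈ S')) : ctrS x S = ctrS x S' := by
  apply PySem.Dict.ext
  simp only [ctrS]
  congr 1
  apply List.filter_congr
  intro a ha
  simp only [PySem.List.mem_dedup] at ha
  simp [h a ha]

lemma loopA (x : List Char) (ys : List Char) (S : List Char) (res : List (List Char)) :
    ys.foldl
      (fun (acc : List (List Char) × PySem.Dict Char Int) ch =>
        if acc.2.contains ch then
          (acc.1 ++ [PySem.List.pyRepeat [ch] (acc.2.getD ch 0)], acc.2.erase ch)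
        else acc) (res, ctrS x S)
      = (res ++ emitA x ys S, ctrS x (S ++ ys)) := by
  induction ys generalizing S res with
  | nil => simp [emitA]
  | cons c ys ih =>
    simp only [List.foldl_cons, ctrS_contains, emitA]
    by_cases hb : (x.contains c && !S.contains c) = true
    · have hx : c ∈ x := by
        have := (Bool.and_eq_true _ _).mp hb
        simpa using this.1
      have hs : c ∉ S := by
        have := (Bool.and_eq_true _ _).mp hb
        simpa using this.2
      rw [if_pos hb, if_pos hb, ctrS_getD x S c hx hs, ctrS_erase,
        PySem.List.pyRepeat_singleton, ih (S ++ [c])]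
      simp [List.append_assoc]
    · have hb' : (x.contains c && !S.contains c) = false := by
        exact Bool.not_eq_true _ ▸ (by simpa using hb)
      rw [if_neg hb, if_neg hb]
      have hcs : ctrS x S = ctrS x (S ++ [c]) := by
        apply ctrS_congr
        intro a hax
        by_cases hac : a = c
        · subst hac
          have : a ∈ S := by
            by_contra hnot
            apply hb
            simp [hax, hnot]
          simp [this]
        · simp [hac]
      rw [hcs, ih (S ++ [c])]
      simp [List.append_assoc]

lemma emitA_flatten (x : List Char) (ys : List Char) (S : List Char) :
    (emitA x ys S).flatten = (gNew S ys).flatMap (fun c => List.replicate (List.count c x) c) := by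
  induction ys generalizing S with
  | nil => simp [emitA, gNew]
  | cons c ys ih =>
    by_cases hs : c ∈ S
    · have hb : (x.contains c && !S.contains c) = false := by simp [hs]
      have hgc : gNew (S ++ [c]) ys = gNew S ys := by
        apply gNew_congr
        intro a
        by_cases hac : a = c <;> simp [hac, hs]
      simp only [emitA, hb, Bool.false_eq_true, if_false, ih (S ++ [c]), hgc, gNew,
        List.contains_iff_mem, hs, decide_true, if_true]
    · by_cases hx : c ∈ x
      · have hb : (x.contains c && !S.contains c) = true := by simp [hs, hx]
        simp only [emitA, hb, if_true, List.flatten_cons, ih (S ++ [c]), gNew,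
          List.contains_iff_mem, hs, decide_false, Bool.false_eq_true, if_false,
          List.flatMap_cons]
      · have hb : (x.contains c && !S.contains c) = false := by simp [hx]
        have hcnt : List.count c x = 0 := List.count_eq_zero.mpr hx
        simp only [emitA, hb, Bool.false_eq_true, if_false, ih (S ++ [c]), gNew,
          List.contains_iff_mem, hs, decide_false, List.flatMap_cons, hcnt,
          List.replicate_zero, List.nil_append, if_false]

lemma dedup_eq_gNew (l : List Char) : PySem.List.dedup l = gNew [] l := by
  simpa using foldl_add_eq l []

-- A's output is the middle form
lemma a_eq_mid (x y : String) :
    specificOrder x y = String.ofList ((DL x.toList y.toList).flatMap (blkL x.toList)) := by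
  unfold specificOrder
  simp only [ctrS_counter, loopA x.toList y.toList [] [], List.nil_append,
    PySem.List.foldl_append_singleton_eq_map]
  congr 1
  rw [List.flatten_append, emitA_flatten]
  unfold DL blkL
  rw [List.flatMap_append, ← dedup_eq_gNew]
  congr 1
  simp only [ctrS, List.map_map, List.flatMap_def]
  congr 1
  apply List.map_congr_left
  intro c _
  simp [PySem.List.pyRepeat_singleton]

-- ---- B-side machinery ----

lemma index?_of_mem {a : Char} {l : List Char} (h : a ∈ l) :
    ∃ k, PySem.List.index? l a = some k ∧ ∃ hk : k < l.length, l[k] = a := by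
  cases hidx : PySem.List.index? l a with
  | none =>
    exfalso
    simp only [PySem.List.index?_eq_idxOf?] at hidx
    exact (List.idxOf?_eq_none_iff.mp hidx) h
  | some k =>
    obtain ⟨hk, hget, _⟩ := PySem.List.getElem_of_index?_eq_some hidx
    exact ⟨k, rfl, hk, hget⟩

lemma key2_bounds (x : List Char) (c : Char) :
    0 ≤ key2 x c ∧ key2 x c < (x.length : Int) + 1 := by
  unfold key2
  cases h : PySem.List.index? x c with
  | none => simp
  | some k =>
    obtain ⟨hk, -, -⟩ := PySem.List.getElem_of_index?_eq_some h
    simp only [Option.getD_some]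
    omega

lemma lex_scalar (a1 b1 a2 b2 M : Int) (h1 : 0 ≤ a2) (h2 : a2 < M) (h3 : 0 ≤ b2) (h4 : b2 < M) :
    a1 * M + a2 < b1 * M + b2 ↔ (a1 < b1 ∨ (a1 = b1 ∧ a2 < b2)) := by
  constructor
  · intro hlt
    by_contra hc
    push_neg at hc
    obtain ⟨h5, h6⟩ := hc
    rcases lt_or_eq_of_le h5 with h7 | h7
    · nlinarith
    · have h8 := h6 h7.symm
      rw [h7] at hlt
      nlinarith
  · rintro (h5 | ⟨h5, h6⟩)
    · nlinarith
    · subst h5; nlinarith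

lemma keyK_lt_iff (x y : List Char) (a b : Char) :
    keyK x y a < keyK x y b ↔
      (key1 y a < key1 y b ∨ (key1 y a = key1 y b ∧ key2 x a < key2 x b)) := by
  obtain ⟨h1, h2⟩ := key2_bounds x a
  obtain ⟨h3, h4⟩ := key2_bounds x b
  exact lex_scalar _ _ _ _ _ h1 h2 h3 h4

lemma lt2_eq (x y : List Char) (a b : Char) :
    (decide (key1 y a < key1 y b) ||
      (!decide (key1 y b < key1 y a) && decide (key2 x a < key2 x b)))
    = decide (keyK x y a < keyK x y b) := by
  have hK := keyK_lt_iff x y a b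
  by_cases hab : key1 y a < key1 y b
  · simp [hab, hK.mpr (Or.inl hab)]
  · by_cases hba : key1 y b < key1 y a
    · have hn : ¬ keyK x y a < keyK x y b := by
        intro h
        rcases hK.mp h with h' | ⟨he, _⟩ <;> omega
      simp [hab, hba, hn]
    · have he : key1 y a = key1 y b := by omega
      by_cases h2' : key2 x a < key2 x b
      · simp [hab, hba, h2', hK.mpr (Or.inr ⟨he, h2'⟩)]
      · have hn : ¬ keyK x y a < keyK x y b := by
          intro h
          rcases hK.mp h with h' | ⟨_, h''⟩ <;> omega
        simp [hab, hba, h2', hn]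

lemma sorted2_eq_sorted (x y : List Char) :
    PySem.List.sorted2 x (key1 y) (key2 x) false = PySem.List.sorted x (keyK x y) := by
  rw [PySem.List.sorted_eq_foldl_insertBy]
  show x.foldl
      (fun acc c => PySem.List.insertBy
        (fun a b => decide (key1 y a < key1 y b) ||
          (!decide (key1 y b < key1 y a) && decide (key2 x a < key2 x b))) c acc) [] = _
  have h : (fun a b => decide (key1 y a < key1 y b) ||
      (!decide (key1 y b < key1 y a) && decide (key2 x a < key2 x b)))
      = (fun a b => decide (keyK x y a < keyK x y b)) := by
    funext a b; exact lt2_eq x y a b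
  rw [h]

-- two key-nondecreasing rearrangements of each other, with the key injective on the members,
-- are the same list
lemma eq_of_perm_pairwise (K : Char → Int) :
    ∀ (l₁ l₂ : List Char), l₁.Perm l₂ →
      l₁.Pairwise (fun a b => K a ≤ K b) → l₂.Pairwise (fun a b => K a ≤ K b) →
      (∀ a ∈ l₁, ∀ b ∈ l₁, K a = K b → a = b) → l₁ = l₂ := by
  intro l₁
  induction l₁ with
  | nil =>
    intro l₂ hp _ _ _
    exact (hp.symm.eq_nil).symm
  | cons a t ih =>
    intro l₂ hp h₁ h₂ hinj
    cases l₂ with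
    | nil => exact absurd hp.eq_nil (by simp)
    | cons b t₂ =>
      obtain ⟨ha1, ht1⟩ := List.pairwise_cons.mp h₁
      obtain ⟨hb1, ht2⟩ := List.pairwise_cons.mp h₂
      have hbmem : b ∈ a :: t := hp.mem_iff.mpr (List.mem_cons_self)
      have hamem : a ∈ b :: t₂ := hp.mem_iff.mp (List.mem_cons_self)
      have hKab : K a ≤ K b := by
        rcases List.mem_cons.mp hbmem with h | h
        · rw [h]
        · exact ha1 b h
      have hKba : K b ≤ K a := by
        rcases List.mem_cons.mp hamem with h | h
        · rw [h]
        · exact hb1 a h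
      have hab : a = b := hinj a List.mem_cons_self b hbmem (le_antisymm hKab hKba)
      subst hab
      have hp' : t.Perm t₂ := hp.cons_inv
      have ht : t = t₂ :=
        ih t₂ hp' ht1 ht2
          (fun a' ha' b' hb' => hinj a' (List.mem_cons_of_mem _ ha') b' (List.mem_cons_of_mem _ hb'))
      rw [ht]

lemma keyK_inj (x y : List Char) (a b : Char) (ha : a ∈ x) (hb : b ∈ x)
    (h : keyK x y a = keyK x y b) : a = b := by
  obtain ⟨ka, hka, hlta, hgeta⟩ := index?_of_mem ha
  obtain ⟨kb, hkb, hltb, hgetb⟩ := index?_of_mem hb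
  have h2a : key2 x a = (ka : Int) := by unfold key2; rw [hka]; rfl
  have h2b : key2 x b = (kb : Int) := by unfold key2; rw [hkb]; rfl
  have he1 : key1 y a = key1 y b := by
    rcases lt_trichotomy (key1 y a) (key1 y b) with h' | h' | h'
    · exact absurd ((keyK_lt_iff x y a b).mpr (Or.inl h')) (by omega)
    · exact h'
    · exact absurd ((keyK_lt_iff x y b a).mpr (Or.inl h')) (by omega)
  have he2 : key2 x a = key2 x b := by
    unfold keyK at h
    rw [he1] at h
    linarith
  have hk : ka = kb := by
    rw [h2a, h2b] at he2
    exact_mod_cast he2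
  subst hk
  rw [← hgeta, ← hgetb]

lemma dedup_cons (c : Char) (l : List Char) :
    PySem.List.dedup (c :: l) = c :: (PySem.List.dedup l).filter (fun a => !(a == c)) := by
  have h0 : PySem.List.dedup (c :: l) = [c] ++ gNew [c] l := by
    show (c :: l).foldl PySem.Set.add [] = _
    simp only [List.foldl_cons]
    have hadd : PySem.Set.add ([] : List Char) c = [c] := rfl
    rw [hadd, foldl_add_eq]
  have h1 : gNew [c] l = (gNew [] l).filter (fun a => !([c].contains a)) := by
    have := gNew_filter [c] l []
    simpa using this
  rw [h0, h1, ← dedup_eq_gNew]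
  simp only [List.singleton_append, List.cons.injEq, true_and]
  apply List.filter_congr
  intro a _
  by_cases hac : a = c
  · simp [hac]
  · simp [hac, (Ne.symm hac : c ≠ a)]

lemma dedup_pairwise_idx (l : List Char) :
    (PySem.List.dedup l).Pairwise
      (fun a b => (PySem.List.index? l a).getD 0 < (PySem.List.index? l b).getD 0) := by
  induction l with
  | nil => exact List.Pairwise.nil
  | cons c l ih =>
    rw [dedup_cons]
    refine List.pairwise_cons.mpr ⟨?_, ?_⟩
    · intro b hb
      simp only [List.mem_filter, Bool.not_eq_eq_eq_not, Bool.not_true, beq_eq_false_iff_ne,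
        PySem.List.mem_dedup] at hb
      obtain ⟨hbl, hbne⟩ := hb
      obtain ⟨k, hk, -, -⟩ := index?_of_mem hbl
      have hc : PySem.List.index? (c :: l) c = some 0 := by
        simp [PySem.List.index?_eq_idxOf?, List.idxOf?_cons]
      have hb' : PySem.List.index? (c :: l) b = Option.map (· + 1) (PySem.List.index? l b) :=
        PySem.List.index?_cons_of_ne l (fun h => hbne h.symm)
      rw [hc, hb', hk]
      simp
    · refine List.Pairwise.imp_of_mem ?_ ((ih.filter _))
      intro a b ha hb hr
      simp only [List.mem_filter, Bool.not_eq_eq_eq_not, Bool.not_true, beq_eq_false_iff_ne,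
        PySem.List.mem_dedup] at ha hb
      obtain ⟨hal, hane⟩ := ha
      obtain ⟨hbl, hbne⟩ := hb
      obtain ⟨ka, hka, -, -⟩ := index?_of_mem hal
      obtain ⟨kb, hkb, -, -⟩ := index?_of_mem hbl
      have ha' : PySem.List.index? (c :: l) a = Option.map (· + 1) (PySem.List.index? l a) :=
        PySem.List.index?_cons_of_ne l (fun h => hane h.symm)
      have hb' : PySem.List.index? (c :: l) b = Option.map (· + 1) (PySem.List.index? l b) :=
        PySem.List.index?_cons_of_ne l (fun h => hbne h.symm)
      rw [hka, hkb] at hr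
      simp only [Option.getD_some] at hr
      rw [ha', hb', hka, hkb]
      simp only [Option.map_some, Option.getD_some]
      omega

lemma key1_of_mem (y : List Char) (c : Char) (h : c ∈ y) :
    ∃ k, PySem.List.index? y c = some k ∧ key1 y c = (k : Int) ∧ k < y.length := by
  obtain ⟨k, hk, hlt, -⟩ := index?_of_mem h
  refine ⟨k, hk, ?_, hlt⟩
  unfold key1
  rw [if_pos (by simpa [List.contains_iff_mem] using h), hk]
  rfl

lemma contains_eq_false {a : Char} {l : List Char} : l.contains a = false ↔ a ∉ l := by
  simp [List.contains_iff_mem]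

lemma key1_of_not_mem (y : List Char) (c : Char) (h : c ∉ y) :
    key1 y c = (y.length : Int) := by
  simp [key1, List.contains_iff_mem, h]

lemma DL_pairwise (x y : List Char) :
    (DL x y).Pairwise (fun a b => a ∈ x → b ∈ x → keyK x y a < keyK x y b) := by
  unfold DL
  rw [List.pairwise_append]
  refine ⟨?_, ?_, ?_⟩
  · refine List.Pairwise.imp_of_mem ?_ (dedup_pairwise_idx y)
    intro a b ha hb hr _ _
    rw [PySem.List.mem_dedup] at ha hb
    obtain ⟨ka, hka, hk1a, -⟩ := key1_of_mem y a ha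
    obtain ⟨kb, hkb, hk1b, -⟩ := key1_of_mem y b hb
    rw [hka, hkb] at hr
    simp only [Option.getD_some] at hr
    exact (keyK_lt_iff x y a b).mpr (Or.inl (by rw [hk1a, hk1b]; exact_mod_cast hr))
  · refine List.Pairwise.imp_of_mem ?_ ((dedup_pairwise_idx x).filter _)
    intro a b ha hb hr hax hbx
    simp only [List.mem_filter, PySem.List.mem_dedup, Bool.not_eq_eq_eq_not, Bool.not_true,
      List.contains_iff_mem, decide_eq_false_iff_not] at ha hb
    have he : key1 y a = key1 y b := by
      rw [key1_of_not_mem y a (contains_eq_false.mp ha.2), key1_of_not_mem y b (contains_eq_false.mp hb.2)]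
    obtain ⟨ka, hka, -, -⟩ := index?_of_mem hax
    obtain ⟨kb, hkb, -, -⟩ := index?_of_mem hbx
    refine (keyK_lt_iff x y a b).mpr (Or.inr ⟨he, ?_⟩)
    rw [hka, hkb] at hr
    simp only [Option.getD_some] at hr
    simp only [key2, hka, hkb, Option.getD_some]
    exact_mod_cast hr
  · intro a ha b hb _ _
    rw [PySem.List.mem_dedup] at ha
    simp only [List.mem_filter, PySem.List.mem_dedup, Bool.not_eq_eq_eq_not, Bool.not_true,
      List.contains_iff_mem, decide_eq_false_iff_not] at hb
    obtain ⟨ka, -, hk1a, hlt⟩ := key1_of_mem y a ha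
    have hk1b : key1 y b = (y.length : Int) := key1_of_not_mem y b (contains_eq_false.mp hb.2)
    exact (keyK_lt_iff x y a b).mpr (Or.inl (by rw [hk1a, hk1b]; exact_mod_cast hlt))

lemma flatMap_blk_pairwise (x y : List Char) :
    ∀ (D : List Char), D.Pairwise (fun a b => a ∈ x → b ∈ x → keyK x y a < keyK x y b) →
      (D.flatMap (blkL x)).Pairwise (fun a b => keyK x y a ≤ keyK x y b) := by
  intro D
  induction D with
  | nil => simp
  | cons c D ih =>
    intro h
    obtain ⟨hc, hD⟩ := List.pairwise_cons.mp h
    simp only [List.flatMap_cons]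
    rw [List.pairwise_append]
    refine ⟨?_, ih hD, ?_⟩
    · unfold blkL
      apply List.pairwise_replicate.mpr
      exact Or.inr le_rfl
    · intro a ha b hb
      have hac : a = c := List.eq_of_mem_replicate ha
      have hcx : c ∈ x := by
        have : List.count c x ≠ 0 := by
          intro h0
          rw [blkL, h0] at ha
          simp at ha
        exact List.count_pos_iff.mp (Nat.pos_of_ne_zero this)
      obtain ⟨c', hc'D, hbc'⟩ := List.mem_flatMap.mp hb
      have hbc : b = c' := List.eq_of_mem_replicate hbc'
      have hc'x : c' ∈ x := by
        have : List.count c' x ≠ 0 := by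
          intro h0
          rw [blkL, h0] at hbc'
          simp at hbc'
        exact List.count_pos_iff.mp (Nat.pos_of_ne_zero this)
      rw [hac, hbc]
      exact le_of_lt (hc c' hc'D hcx hc'x)

lemma count_flatMap_blk (x : List Char) (a : Char) :
    ∀ (D : List Char), D.Nodup →
      List.count a (D.flatMap (blkL x)) = if a ∈ D then List.count a x else 0 := by
  intro D
  induction D with
  | nil => simp
  | cons c D ih =>
    intro hN
    obtain ⟨hcD, hN'⟩ := List.nodup_cons.mp hN
    simp only [List.flatMap_cons, List.count_append, ih hN']
    by_cases hac : a = c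
    · subst hac
      have : a ∉ D := hcD
      simp [blkL, List.count_replicate, this]
    · simp [blkL, List.count_replicate, hac, Ne.symm hac, List.mem_cons]

lemma perm_mid (x y : List Char) : x.Perm ((DL x y).flatMap (blkL x)) := by
  rw [List.perm_iff_count]
  intro a
  have hN : (DL x y).Nodup := by
    unfold DL
    rw [List.nodup_append]
    refine ⟨PySem.List.nodup_dedup y, (PySem.List.nodup_dedup x).filter _, ?_⟩
    intro a ha b hb heq
    subst heq
    rw [PySem.List.mem_dedup] at ha
    rcases List.mem_filter.mp hb with ⟨-, hcontains⟩
    exact absurd ha (contains_eq_false.mp (by simpa using hcontains))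
  rw [count_flatMap_blk x a _ hN]
  by_cases hax : a ∈ x
  · have : a ∈ DL x y := by
      unfold DL
      by_cases hay : a ∈ y
      · refine List.mem_append_left _ ?_
        rw [PySem.List.mem_dedup]
        exact hay
      · refine List.mem_append_right _ (List.mem_filter.mpr ⟨?_, ?_⟩)
        · rw [PySem.List.mem_dedup]; exact hax
        · simpa using hay
    simp [this]
  · rw [List.count_eq_zero.mpr hax]
    split_ifs <;> simp [List.count_eq_zero.mpr hax]

-- B's output is the middle form
lemma b_eq_mid (x y : String) :
    specificOrder_alt x y = String.ofList ((DL x.toList y.toList).flatMap (blkL x.toList)) := by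
  unfold specificOrder_alt
  have hport : PySem.List.sorted2 x.toList
      (fun c => if y.toList.contains c then (((PySem.List.index? y.toList c).getD 0 : Nat) : Int)
                else (y.toList.length : Int))
      (fun c => (((PySem.List.index? x.toList c).getD 0 : Nat) : Int)) false
      = PySem.List.sorted2 x.toList (key1 y.toList) (key2 x.toList) false := rfl
  rw [hport, sorted2_eq_sorted]
  congr 1
  refine eq_of_perm_pairwise (keyK x.toList y.toList) _ _
    ((PySem.List.sorted_perm x.toList (keyK x.toList y.toList) false).trans
      (perm_mid x.toList y.toList))
    (PySem.List.sorted_pairwise x.toList (keyK x.toList y.toList))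
    (flatMap_blk_pairwise x.toList y.toList _ (DL_pairwise x.toList y.toList))
    ?_
  intro a ha b hb h
  rw [PySem.List.mem_sorted] at ha hb
  exact keyK_inj x.toList y.toList a b ha hb h

-- ===== VERDICT (by name: the statement is the Claim_ definition above) =====
theorem specificOrder_spec : Claim_equal_specificOrder := by
  intro x y _
  show specificOrder x y = specificOrder_alt x y
  rw [a_eq_mid, b_eq_mid]
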